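-- pv_equiv track=rewrite | github.com/daniel-reich/ubiquitous-fiesta | bdsWZ29zJfJ2Roymv_7.py | swap_two
-- ===== SOURCE A (Python) =====
-- def swap_two(txt):
--     s=''
--     for i in range(0,len(txt),4):
--         t=txt[i:i+4]
--         if len(t)==4:
--             s+=t[2:]+t[:2]
--         else:
--             s+=t
--     return s
-- ===== SOURCE B (Python) =====
-- def swap_two(txt):
--     m = len(txt) - len(txt) % 4
--     return ''.join(txt[i + 2] if i % 4 < 2 else txt[i - 2] for i in range(m)) + txt[m:]
-- ===== Notes on version B (the rewrite author's own statement) =====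
-- stated objective: alternative
-- what changed: A rebuilds the string by slicing 4-char blocks in a stride-4 loop and concatenating swapped halves; B computes each output character directly by a closed-form index permutation (txt[i+2] if i%4<2 else txt[i-2]) over the full-block prefix and appends the untouched tail.
import Mathlib
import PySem

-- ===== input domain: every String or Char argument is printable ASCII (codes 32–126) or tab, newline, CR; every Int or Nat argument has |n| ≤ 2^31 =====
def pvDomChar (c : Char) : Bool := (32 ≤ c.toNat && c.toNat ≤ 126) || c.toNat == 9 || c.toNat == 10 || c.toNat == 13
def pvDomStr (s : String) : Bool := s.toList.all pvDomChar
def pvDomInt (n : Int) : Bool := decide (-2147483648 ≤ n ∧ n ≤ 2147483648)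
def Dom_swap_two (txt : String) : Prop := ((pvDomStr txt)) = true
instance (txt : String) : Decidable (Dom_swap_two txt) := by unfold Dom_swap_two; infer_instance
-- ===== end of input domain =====

-- B swaps the halves of each 4-char block by a closed-form index permutation instead of A's
-- stride-4 slice-and-concatenate loop (objective: alternative; same O(n) cost).

-- ===== PORT A =====
-- strings are ported through their character lists (PySem convention); s += x is list append
def swap_two (txt : String) : String :=
  let cs := txt.toList
  let s := (PySem.List.pyRange 0 (cs.length : Int) 4).foldl
    (fun s i =>
      let t := PySem.List.slice cs (some i) (some (i + 4))
      if t.length = 4 then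
        s ++ (PySem.List.slice t (some 2) none ++ PySem.List.slice t none (some 2))
      else s ++ t) []
  String.ofList s

-- ===== PORT B =====
-- ''.join(generator over range(m)) ++ txt[m:], each character fetched by index arithmetic
def swap_two_alt (txt : String) : String :=
  let cs := txt.toList
  let m : Int := (cs.length : Int) - PySem.Int.mod (cs.length : Int) 4
  String.ofList
    (((PySem.List.pyRange 0 m 1).map (fun i =>
        if PySem.Int.mod i 4 < 2 then PySem.List.pyGetD cs (i + 2) ' '
        else PySem.List.pyGetD cs (i - 2) ' ')) ++
      PySem.List.slice cs (some m) none)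

-- ===== PRECONDITION & SPEC =====
def Spec_swap_two (txt : String) (out : String) : Prop := out = swap_two_alt txt
instance (txt : String) (out : String) : Decidable (Spec_swap_two txt out) := by unfold Spec_swap_two; infer_instance

-- ===== CLAIM (what is proved, stated in full; the proofs are below) =====
def Claim_equal_swap_two : Prop := ∀ (txt : String), Dom_swap_two txt → Spec_swap_two txt (swap_two txt)

-- ===== LEMMAS AND PROOFS =====

-- reference recursion: swap the two halves of each full 4-char block
def pvSwapRec : List Char → List Char
  | a :: b :: c :: d :: r => c :: d :: a :: b :: pvSwapRec r
  | r => r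

lemma pvRange4_cons (n : Int) (h : 0 < n) :
    PySem.List.pyRange 0 n 4 = 0 :: (PySem.List.pyRange 0 (n - 4) 4).map (· + 4) := by
  rw [PySem.List.pyRange_of_pos 0 n (by norm_num), PySem.List.pyRange_of_pos 0 (n - 4) (by norm_num)]
  have hc : (if (0:Int) < n then ((n - 0 + 4 - 1) / 4).toNat else 0)
      = (if (0:Int) < n - 4 then ((n - 4 - 0 + 4 - 1) / 4).toNat else 0) + 1 := by
    split_ifs <;> omega
  rw [hc, List.range_succ_eq_map, List.map_cons, List.map_map, List.map_map]
  refine congrArg₂ List.cons (by norm_num) ?_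
  apply List.map_congr_left
  intro k _
  simp [Function.comp]
  ring

lemma pvDrop4 (a b c d : Char) (r : List Char) (m : Nat) :
    (a :: b :: c :: d :: r).drop (m + 4) = r.drop m := rfl

lemma pvGetD4 (a b c d x : Char) (r : List Char) (m : Nat) :
    (a :: b :: c :: d :: r).getD (m + 4) x = r.getD m x := rfl


lemma pvSliceShift (a b c d : Char) (r : List Char) (i : Int) (hi : 0 ≤ i) :
    PySem.List.slice (a :: b :: c :: d :: r) (some (i + 4)) (some (i + 4 + 4))
      = PySem.List.slice r (some i) (some (i + 4)) := by
  lift i to Nat using hi with m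
  rw [show ((m : Int) + 4) = ((m + 4 : Nat) : Int) from by push_cast; ring]
  rw [show (((m + 4 : Nat) : Int) + 4) = ((m + 8 : Nat) : Int) from by push_cast; ring]
  rw [PySem.List.slice_natCast, PySem.List.slice_natCast, pvDrop4]
  congr 1
  omega

lemma pvGetDShift (a b c d x : Char) (r : List Char) (j : Int) (hj : 0 ≤ j) :
    PySem.List.pyGetD (a :: b :: c :: d :: r) (j + 4) x = PySem.List.pyGetD r j x := by
  lift j to Nat using hj with m
  rw [show ((m : Int) + 4) = ((m + 4 : Nat) : Int) from by push_cast; ring,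
    PySem.List.pyGetD_natCast, PySem.List.pyGetD_natCast, pvGetD4]

lemma pvSliceFromShift (a b c d : Char) (r : List Char) (i : Int) (hi : 0 ≤ i) :
    PySem.List.slice (a :: b :: c :: d :: r) (some (i + 4)) none
      = PySem.List.slice r (some i) none := by
  lift i to Nat using hi with m
  rw [show ((m : Int) + 4) = ((m + 4 : Nat) : Int) from by push_cast; ring,
    PySem.List.slice_from_natCast, PySem.List.slice_from_natCast, pvDrop4]

lemma pvFoldlCongr {α β : Type} (F G : β → α → β) (i1 i2 : β) (l : List α)
    (hF : F = G) (hi : i1 = i2) : l.foldl F i1 = l.foldl G i2 := by rw [hF, hi]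

lemma pvA_loop (cs : List Char) : ∀ acc : List Char,
    (PySem.List.pyRange 0 (cs.length : Int) 4).foldl
      (fun s i =>
        let t := PySem.List.slice cs (some i) (some (i + 4))
        if t.length = 4 then
          s ++ (PySem.List.slice t (some 2) none ++ PySem.List.slice t none (some 2))
        else s ++ t) acc = acc ++ pvSwapRec cs := by
  induction cs using pvSwapRec.induct with
  | case1 a b c d r ih =>
    intro acc
    have hlen : (((a :: b :: c :: d :: r).length : Int)) = (r.length : Int) + 4 := by
      push_cast [List.length_cons]; ring
    rw [hlen, pvRange4_cons _ (by omega),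
      show (r.length : Int) + 4 - 4 = (r.length : Int) from by ring,
      List.foldl_cons, List.foldl_map,
      PySem.List.pyRange_of_pos 0 ((r.length : Int)) (by norm_num), List.foldl_map]
    have hi := ih (acc ++ [c, d, a, b])
    rw [PySem.List.pyRange_of_pos 0 ((r.length : Int)) (by norm_num), List.foldl_map] at hi
    rw [show acc ++ pvSwapRec (a :: b :: c :: d :: r) = (acc ++ [c, d, a, b]) ++ pvSwapRec r from by
      simp [pvSwapRec], ← hi]
    refine pvFoldlCongr _ _ _ _ _ ?_ ?_
    · funext s k
      dsimp only
      rw [pvSliceShift a b c d r (0 + 4 * (k : Int)) (by positivity)]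
    · dsimp only
      have ht : PySem.List.slice (a :: b :: c :: d :: r) (some (0 : Int)) (some ((0 : Int) + 4))
          = [a, b, c, d] := by
        rw [PySem.List.slice_zero_start, show ((0 : Int) + 4) = ((4 : Nat) : Int) from by norm_num,
          PySem.List.slice_to_natCast]
        rfl
      rw [ht]
      rfl
  | case2 r h =>
    intro acc
    rcases r with _ | ⟨x, _ | ⟨y, _ | ⟨z, _ | ⟨w, v⟩⟩⟩⟩
    · rw [show ((([] : List Char).length : Int)) = (0 : Int) from by norm_num,
        show PySem.List.pyRange 0 (0 : Int) 4 = [] from by decide, List.foldl_nil]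
      exact (List.append_nil acc).symm
    · rw [show ((([x] : List Char).length : Int)) = (1 : Int) from by norm_num,
        show PySem.List.pyRange 0 (1 : Int) 4 = [0] from by decide,
        List.foldl_cons, List.foldl_nil]
      dsimp only
      rw [show PySem.List.slice ([x] : List Char) (some (0 : Int)) (some ((0 : Int) + 4)) = [x] from by
        rw [PySem.List.slice_zero_start, show ((0 : Int) + 4) = ((4 : Nat) : Int) from by norm_num,
          PySem.List.slice_to_natCast]
        rfl]
      rfl
    · rw [show ((([x, y] : List Char).length : Int)) = (2 : Int) from by norm_num,
        show PySem.List.pyRange 0 (2 : Int) 4 = [0] from by decide,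
        List.foldl_cons, List.foldl_nil]
      dsimp only
      rw [show PySem.List.slice ([x, y] : List Char) (some (0 : Int)) (some ((0 : Int) + 4)) = [x, y] from by
        rw [PySem.List.slice_zero_start, show ((0 : Int) + 4) = ((4 : Nat) : Int) from by norm_num,
          PySem.List.slice_to_natCast]
        rfl]
      rfl
    · rw [show ((([x, y, z] : List Char).length : Int)) = (3 : Int) from by norm_num,
        show PySem.List.pyRange 0 (3 : Int) 4 = [0] from by decide,
        List.foldl_cons, List.foldl_nil]
      dsimp only
      rw [show PySem.List.slice ([x, y, z] : List Char) (some (0 : Int)) (some ((0 : Int) + 4)) = [x, y, z] from by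
        rw [PySem.List.slice_zero_start, show ((0 : Int) + 4) = ((4 : Nat) : Int) from by norm_num,
          PySem.List.slice_to_natCast]
        rfl]
      rfl
    · exact absurd rfl (h x y z w v)

lemma pvB_eq (cs : List Char) :
    ((PySem.List.pyRange 0 ((cs.length : Int) - PySem.Int.mod (cs.length : Int) 4) 1).map (fun i =>
        if PySem.Int.mod i 4 < 2 then PySem.List.pyGetD cs (i + 2) ' '
        else PySem.List.pyGetD cs (i - 2) ' ')) ++
      PySem.List.slice cs (some ((cs.length : Int) - PySem.Int.mod (cs.length : Int) 4)) none
    = pvSwapRec cs := by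
  induction cs using pvSwapRec.induct with
  | case1 a b c d r ih =>
    have hlen : (((a :: b :: c :: d :: r).length : Int)) = (r.length : Int) + 4 := by
      push_cast [List.length_cons]; ring
    have hmodN := PySem.Int.mod_natCast r.length 4
    have hmodN4 := PySem.Int.mod_natCast (r.length + 4) 4
    push_cast at hmodN hmodN4
    have hmod : PySem.Int.mod ((r.length : Int) + 4) 4 = PySem.Int.mod ((r.length : Int)) 4 := by
      rw [hmodN4, hmodN]
      omega
    have hm0 : 0 ≤ (r.length : Int) - PySem.Int.mod ((r.length : Int)) 4 := by
      rw [hmodN]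
      have := Nat.mod_le r.length 4
      omega
    rw [hlen, hmod, show ((r.length : Int) + 4) - PySem.Int.mod ((r.length : Int)) 4
        = ((r.length : Int) - PySem.Int.mod ((r.length : Int)) 4) + 4 from by ring]
    rw [PySem.List.pyRange_one_append 0 4
      (((r.length : Int) - PySem.Int.mod ((r.length : Int)) 4) + 4) (by norm_num) (by omega)]
    rw [List.map_append, List.append_assoc]
    have g0 : (if PySem.Int.mod (0 : Int) 4 < 2
        then PySem.List.pyGetD (a :: b :: c :: d :: r) ((0 : Int) + 2) ' '
        else PySem.List.pyGetD (a :: b :: c :: d :: r) ((0 : Int) - 2) ' ') = c := by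
      rw [if_pos (by decide), show ((0 : Int) + 2) = ((2 : Nat) : Int) from by norm_num,
        PySem.List.pyGetD_natCast]
      rfl
    have g1 : (if PySem.Int.mod (1 : Int) 4 < 2
        then PySem.List.pyGetD (a :: b :: c :: d :: r) ((1 : Int) + 2) ' '
        else PySem.List.pyGetD (a :: b :: c :: d :: r) ((1 : Int) - 2) ' ') = d := by
      rw [if_pos (by decide), show ((1 : Int) + 2) = ((3 : Nat) : Int) from by norm_num,
        PySem.List.pyGetD_natCast]
      rfl
    have g2 : (if PySem.Int.mod (2 : Int) 4 < 2
        then PySem.List.pyGetD (a :: b :: c :: d :: r) ((2 : Int) + 2) ' '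
        else PySem.List.pyGetD (a :: b :: c :: d :: r) ((2 : Int) - 2) ' ') = a := by
      rw [if_neg (by decide), show ((2 : Int) - 2) = ((0 : Nat) : Int) from by norm_num,
        PySem.List.pyGetD_natCast]
      rfl
    have g3 : (if PySem.Int.mod (3 : Int) 4 < 2
        then PySem.List.pyGetD (a :: b :: c :: d :: r) ((3 : Int) + 2) ' '
        else PySem.List.pyGetD (a :: b :: c :: d :: r) ((3 : Int) - 2) ' ') = b := by
      rw [if_neg (by decide), show ((3 : Int) - 2) = ((1 : Nat) : Int) from by norm_num,
        PySem.List.pyGetD_natCast]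
      rfl
    have hfirst : (PySem.List.pyRange 0 4 1).map (fun i =>
        if PySem.Int.mod i 4 < 2 then PySem.List.pyGetD (a :: b :: c :: d :: r) (i + 2) ' '
        else PySem.List.pyGetD (a :: b :: c :: d :: r) (i - 2) ' ') = [c, d, a, b] := by
      rw [show PySem.List.pyRange 0 4 1 = [0, 1, 2, 3] from by decide]
      simp only [List.map_cons, List.map_nil]
      rw [g0, g1, g2, g3]
    have hshift : (PySem.List.pyRange 4
          (((r.length : Int) - PySem.Int.mod ((r.length : Int)) 4) + 4) 1).map (fun i =>
        if PySem.Int.mod i 4 < 2 then PySem.List.pyGetD (a :: b :: c :: d :: r) (i + 2) ' '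
        else PySem.List.pyGetD (a :: b :: c :: d :: r) (i - 2) ' ')
        = (PySem.List.pyRange 0 ((r.length : Int) - PySem.Int.mod ((r.length : Int)) 4) 1).map
          (fun i => if PySem.Int.mod i 4 < 2 then PySem.List.pyGetD r (i + 2) ' '
            else PySem.List.pyGetD r (i - 2) ' ') := by
      rw [PySem.List.pyRange_one 4 (((r.length : Int) - PySem.Int.mod ((r.length : Int)) 4) + 4),
        PySem.List.pyRange_one 0 ((r.length : Int) - PySem.Int.mod ((r.length : Int)) 4),
        show (((r.length : Int) - PySem.Int.mod ((r.length : Int)) 4) + 4 - 4)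
          = (r.length : Int) - PySem.Int.mod ((r.length : Int)) 4 from by ring,
        show ((r.length : Int) - PySem.Int.mod ((r.length : Int)) 4) - 0
          = (r.length : Int) - PySem.Int.mod ((r.length : Int)) 4 from by ring,
        List.map_map, List.map_map]
      apply List.map_congr_left
      intro k _
      simp only [Function.comp]
      have hmodk : PySem.Int.mod (4 + (k : Int)) 4 = PySem.Int.mod ((k : Int)) 4 := by
        have h1 := PySem.Int.mod_natCast (4 + k) 4
        have h2 := PySem.Int.mod_natCast k 4
        push_cast at h1 h2
        rw [h1, h2]
        omega
      rw [hmodk, show ((0 : Int) + (k : Int)) = ((k : Int)) from by ring]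
      by_cases hk : PySem.Int.mod ((k : Int)) 4 < 2
      · rw [if_pos hk, if_pos hk, show (4 + (k : Int) + 2) = ((k : Int) + 2) + 4 from by ring,
          pvGetDShift a b c d ' ' r ((k : Int) + 2) (by positivity)]
      · have hk2 : 2 ≤ k := by
          have h2 := PySem.Int.mod_natCast k 4
          push_cast at h2
          rw [h2] at hk
          omega
        rw [if_neg hk, if_neg hk, show (4 + (k : Int) - 2) = ((k : Int) - 2) + 4 from by ring,
          pvGetDShift a b c d ' ' r ((k : Int) - 2) (by omega)]
    have htail : PySem.List.slice (a :: b :: c :: d :: r)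
        (some (((r.length : Int) - PySem.Int.mod ((r.length : Int)) 4) + 4)) none
        = PySem.List.slice r
          (some ((r.length : Int) - PySem.Int.mod ((r.length : Int)) 4)) none :=
      pvSliceFromShift a b c d r ((r.length : Int) - PySem.Int.mod ((r.length : Int)) 4) hm0
    rw [hfirst, hshift, htail, ih]
    rfl
  | case2 r h =>
    rcases r with _ | ⟨x, _ | ⟨y, _ | ⟨z, _ | ⟨w, v⟩⟩⟩⟩
    · rfl
    · rfl
    · rfl
    · rfl
    · exact absurd rfl (h x y z w v)

-- ===== VERDICT (by name: the statement is the Claim_ definition above) =====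
theorem swap_two_spec : Claim_equal_swap_two := by
  intro txt _
  unfold Spec_swap_two swap_two swap_two_alt
  refine congrArg String.ofList ?_
  rw [pvA_loop, pvB_eq, List.nil_append]
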